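-- pv_equiv track=rewrite | github.com/SynUW/BCWildfire | newset_processing/gee_datadownload.py | choose_layout
-- ===== SOURCE A (Python) =====
-- TILE_ROWS = None
--
-- TILE_COLS = None
--
-- def choose_layout(num_tiles: int):
--     if TILE_ROWS and TILE_COLS: return TILE_ROWS, TILE_COLS
--     best = None
--     for r in range(1, num_tiles + 1):
--         c = (num_tiles + r - 1) // r
--         score = (abs(r*c - num_tiles), abs(r - c))
--         if best is None or score < best[0]: best = (score, r, c)
--     _, rows, cols = best
--     return rows, cols
-- ===== SOURCE B (Python) =====
-- TILE_ROWS = None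
--
-- TILE_COLS = None
--
-- def choose_layout(num_tiles: int):
--     if TILE_ROWS and TILE_COLS: return TILE_ROWS, TILE_COLS
--     r = 1
--     d = 1
--     while d * d <= num_tiles:
--         if num_tiles % d == 0:
--             r = d
--         d += 1
--     return r, num_tiles // r
-- ===== Notes on version B (the rewrite author's own statement) =====
-- stated objective: faster
-- what changed: Instead of scanning all rows r in 1..n and minimizing a (quadratic-error, aspect) score, B scans only d in 1..isqrt(n) keeping the largest divisor d of n, which is exactly the first minimizer of A's score; cols = n // d.
import Mathlib
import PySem

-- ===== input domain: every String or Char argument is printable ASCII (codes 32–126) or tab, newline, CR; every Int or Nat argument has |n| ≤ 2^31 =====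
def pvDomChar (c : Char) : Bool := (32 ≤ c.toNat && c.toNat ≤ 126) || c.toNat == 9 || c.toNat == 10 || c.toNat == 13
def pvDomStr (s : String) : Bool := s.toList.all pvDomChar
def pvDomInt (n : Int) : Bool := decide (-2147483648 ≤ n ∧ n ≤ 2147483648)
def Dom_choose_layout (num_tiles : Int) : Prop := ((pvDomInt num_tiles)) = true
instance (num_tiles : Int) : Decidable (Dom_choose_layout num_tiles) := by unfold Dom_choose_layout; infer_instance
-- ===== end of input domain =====

-- B (choose_layout_alt) replaces A's O(n) scan over all row counts by a scan of d = 1..isqrt(n)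
-- keeping the largest divisor d of num_tiles with d*d ≤ num_tiles; return values proved equal.

-- ===== PORT A =====
def TILE_ROWS : Option Int := none
def TILE_COLS : Option Int := none

-- Python truthiness of an Optional[int] module constant (None and 0 are falsy)
def pvTruthy (o : Option Int) : Bool := match o with | none => false | some v => v != 0

-- c = (num_tiles + r - 1) // r
def pvC (n r : Int) : Int := PySem.Int.floordiv (n + r - 1) r

-- score = (abs(r*c - num_tiles), abs(r - c))
def pvScore (n r : Int) : Int × Int := (|r * pvC n r - n|, |r - pvC n r|)

-- Python's lexicographic '<' on the 2-tuples compared by A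
def pvScoreLt (s t : Int × Int) : Bool := s.1 < t.1 || (s.1 == t.1 && s.2 < t.2)

-- loop body: 'if best is None or score < best[0]: best = (score, r, c)'
def pvStep (n : Int) (best : Option ((Int × Int) × Int × Int)) (r : Int) :
    Option ((Int × Int) × Int × Int) :=
  match best with
  | none => some (pvScore n r, r, pvC n r)
  | some b => if pvScoreLt (pvScore n r) b.1 then some (pvScore n r, r, pvC n r) else some b

def choose_layout (num_tiles : Int) : List Int :=
  if pvTruthy TILE_ROWS && pvTruthy TILE_COLS then
    [TILE_ROWS.getD 0, TILE_COLS.getD 0]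
  else
    match (PySem.List.pyRange 1 (num_tiles + 1) 1).foldl (pvStep num_tiles) none with
    | some (_, rows, cols) => [rows, cols]
    | none => []  -- 'best' is still None: Python raises TypeError here (excluded by Pre_)

-- ===== PORT B =====
-- 'while d * d <= num_tiles: if num_tiles % d == 0: r = d; d += 1'
-- (fuel = num_tiles.toNat + 1 is a pure totality guard: the loop itself stops once d*d > n,
-- and d grows by 1 each pass from d = 1, so the fuel is never exhausted first)
def pvBLoop : Nat → Int → Int → Int → Int
  | 0, _, r, _ => r
  | fuel + 1, n, r, d =>
    if d * d ≤ n then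
      pvBLoop fuel n (if PySem.Int.mod n d == 0 then d else r) (d + 1)
    else r

def choose_layout_alt (num_tiles : Int) : List Int :=
  if pvTruthy TILE_ROWS && pvTruthy TILE_COLS then
    [TILE_ROWS.getD 0, TILE_COLS.getD 0]
  else
    let r := pvBLoop (num_tiles.toNat + 1) num_tiles 1 1
    [r, PySem.Int.floordiv num_tiles r]

-- ===== PRECONDITION & SPEC =====
-- For num_tiles < 1 A's loop never runs, best stays None and the unpacking raises TypeError.
def Pre_choose_layout (num_tiles : Int) : Prop := 1 ≤ num_tiles
instance (num_tiles : Int) : Decidable (Pre_choose_layout num_tiles) := by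
  unfold Pre_choose_layout; infer_instance

def pvWitness_choose_layout : Int := 12

def Spec_choose_layout (num_tiles : Int) (out : List Int) : Prop := out = choose_layout_alt num_tiles
instance (num_tiles : Int) (out : List Int) : Decidable (Spec_choose_layout num_tiles out) := by
  unfold Spec_choose_layout; infer_instance

-- ===== CLAIM (what is proved, stated in full; the proofs are below) =====
def Claim_equal_choose_layout : Prop := ∀ (num_tiles : Int), Dom_choose_layout num_tiles → Pre_choose_layout num_tiles → Spec_choose_layout num_tiles (choose_layout num_tiles)

-- ===== LEMMAS AND PROOFS =====

theorem pvC_of_dvd (n r : Int) (hr : 1 ≤ r) (hd : r ∣ n) : pvC n r = n / r := by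
  obtain ⟨q, hq⟩ := hd
  rw [pvC, PySem.Int.floordiv_eq_ediv_of_pos (by omega)]
  subst hq
  have h1 : r * q + r - 1 = (r - 1) + q * r := by ring
  rw [h1, Int.add_mul_ediv_right _ _ (by omega : r ≠ 0),
      Int.ediv_eq_zero_of_lt (by omega) (by omega), Int.mul_ediv_cancel_left _ (by omega : r ≠ 0)]
  omega

theorem pvScore_of_dvd (n r : Int) (hr : 1 ≤ r) (hd : r ∣ n) :
    pvScore n r = (0, |r - n / r|) := by
  have hc := pvC_of_dvd n r hr hd
  have hq : r * (n / r) = n := Int.mul_ediv_cancel' hd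
  rw [pvScore, hc, hq]
  simp

theorem pvScore_of_not_dvd (n r : Int) (hr : 1 ≤ r) (hd : ¬ r ∣ n) :
    1 ≤ (pvScore n r).1 := by
  have h0 : r ≠ 0 := by omega
  have hm1 : 0 ≤ n % r := Int.emod_nonneg n h0
  have hm2 : n % r < r := Int.emod_lt_of_pos n (by omega)
  have hm0 : n % r ≠ 0 := fun h => hd (Int.dvd_of_emod_eq_zero h)
  have hqr : r * (n / r) + n % r = n := by have := Int.mul_ediv_add_emod n r; omega
  have hc : pvC n r = n / r + 1 := by
    rw [pvC, PySem.Int.floordiv_eq_ediv_of_pos (by omega)]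
    have h1 : n + r - 1 = (n % r - 1) + (n / r + 1) * r := by
      have := Int.mul_ediv_add_emod n r
      ring_nf
      omega
    rw [h1, Int.add_mul_ediv_right _ _ h0, Int.ediv_eq_zero_of_lt (by omega) (by omega)]
    omega
  rw [pvScore, hc]
  simp only
  have : r * (n / r + 1) - n = r - n % r := by
    have := Int.mul_ediv_add_emod n r
    ring_nf
    omega
  rw [this, abs_of_pos (by omega)]
  omega

theorem pv_le_div_of_sq_le (n r : Int) (hr : 1 ≤ r) (hd : r ∣ n) (hsq : r * r ≤ n) :
    r ≤ n / r := by
  obtain ⟨q, hq⟩ := hd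
  subst hq
  rw [Int.mul_ediv_cancel_left _ (by omega : r ≠ 0)]
  nlinarith

theorem pv_g_strict (n r1 r2 : Int) (h1 : 1 ≤ r1) (hlt : r1 < r2)
    (hd1 : r1 ∣ n) (hd2 : r2 ∣ n) (hsq : r2 * r2 ≤ n) :
    n / r2 - r2 < n / r1 - r1 := by
  obtain ⟨q1, hq1⟩ := hd1
  obtain ⟨q2, hq2⟩ := hd2
  have e1 : n / r1 = q1 := by rw [hq1, Int.mul_ediv_cancel_left _ (by omega : r1 ≠ 0)]
  have e2 : n / r2 = q2 := by rw [hq2, Int.mul_ediv_cancel_left _ (by omega : r2 ≠ 0)]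
  rw [e1, e2]
  have hn : r1 * q1 = r2 * q2 := by omega
  have hq2r : r2 ≤ q2 := by nlinarith
  nlinarith [mul_pos (by omega : (0:Int) < r2 - r1) (by omega : (0:Int) < q2 - r1)]

theorem pvBLoop_inv (n : Int) : ∀ (fuel : Nat) (d r : Int), 1 ≤ d → n + 1 ≤ d + fuel →
    (pvBLoop fuel n r d = r ∨
      (d ≤ pvBLoop fuel n r d ∧ pvBLoop fuel n r d ∣ n ∧ pvBLoop fuel n r d * pvBLoop fuel n r d ≤ n)) ∧
    (∀ e, d ≤ e → e ∣ n → e * e ≤ n → e ≤ pvBLoop fuel n r d) := by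
  intro fuel
  induction fuel with
  | zero =>
    intro d r hd hf
    refine ⟨Or.inl rfl, ?_⟩
    intro e he hed hee
    exfalso
    have h0 : n + 1 ≤ d := by push_cast at hf; omega
    have h1 : 0 ≤ (e - 1) * e := mul_nonneg (by omega) (by omega)
    nlinarith
  | succ fuel ih =>
    intro d r hd hf
    simp only [pvBLoop]
    by_cases hle : d * d ≤ n
    · rw [if_pos hle]
      by_cases hdvd : (PySem.Int.mod n d == 0) = true
      · simp only [if_pos hdvd]
        obtain ⟨ih1, ih2⟩ := ih (d + 1) d (by omega) (by omega)
        have hdn : d ∣ n := (PySem.Int.mod_eq_zero_iff_dvd n d).mp (by simpa using hdvd)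
        refine ⟨?_, ?_⟩
        · rcases ih1 with h | h
          · right; rw [h]; exact ⟨le_refl d, hdn, hle⟩
          · right; exact ⟨by omega, h.2⟩
        · intro e he hed hee
          rcases eq_or_lt_of_le he with rfl | hlt
          · rcases ih1 with h | h
            · omega
            · omega
          · exact ih2 e (by omega) hed hee
      · simp only [if_neg hdvd]
        obtain ⟨ih1, ih2⟩ := ih (d + 1) r (by omega) (by omega)
        refine ⟨?_, ?_⟩
        · rcases ih1 with h | h
          · left; exact h
          · right; exact ⟨by omega, h.2⟩
        · intro e he hed hee
          rcases eq_or_lt_of_le he with rfl | hlt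
          · exact absurd ((PySem.Int.mod_eq_zero_iff_dvd n d).mpr hed) (by simpa using hdvd)
          · exact ih2 e (by omega) hed hee
    · rw [if_neg hle]
      refine ⟨Or.inl rfl, ?_⟩
      intro e he hed hee
      exfalso
      have : d * d ≤ e * e := by nlinarith
      omega

theorem pvScoreLt_irrefl (s : Int × Int) : pvScoreLt s s = false := by
  simp [pvScoreLt]

theorem pvScoreLt_asym_trans (a b c : Int × Int) (h1 : pvScoreLt a b = false)
    (h2 : pvScoreLt c b = true) : pvScoreLt c a = true ∧ pvScoreLt a c = false := by
  simp only [pvScoreLt, Bool.or_eq_true, Bool.or_eq_false_iff, Bool.and_eq_true,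
    Bool.and_eq_false_iff, decide_eq_true_eq, decide_eq_false_iff_not, not_lt, beq_iff_eq,
    beq_eq_false_iff_ne, ne_eq] at *
  constructor
  · rcases h2 with h2 | ⟨h2, h2'⟩ <;> rcases h1 with ⟨h1a, h1b | h1b⟩ <;> omega
  · rcases h2 with h2 | ⟨h2, h2'⟩ <;> rcases h1 with ⟨h1a, h1b | h1b⟩ <;> omega

theorem pvALoop_inv (n : Int) (_hn : 1 ≤ n) : ∀ k : Int, 1 ≤ k → k ≤ n →
    ∃ ρ, (PySem.List.pyRange 1 (k+1) 1).foldl (pvStep n) none = some (pvScore n ρ, ρ, pvC n ρ) ∧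
      1 ≤ ρ ∧ ρ ≤ k ∧
      (∀ r, 1 ≤ r → r ≤ k → pvScoreLt (pvScore n r) (pvScore n ρ) = false) ∧
      (∀ r, 1 ≤ r → r < ρ → pvScoreLt (pvScore n ρ) (pvScore n r) = true) := by
  intro k hk
  induction k, hk using Int.le_induction with
  | base =>
    intro _
    refine ⟨1, ?_, le_refl 1, le_refl 1, ?_, ?_⟩
    · rw [PySem.List.pyRange_one_singleton]
      rfl
    · intro r h1 h2
      have : r = 1 := by omega
      subst this
      exact pvScoreLt_irrefl _
    · intro r h1 h2; omega
  | succ k hk1 ih =>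
    intro hkn
    obtain ⟨ρ, hfold, hρ1, hρk, hmin, hfirst⟩ := ih (by omega)
    rw [show k + 1 + 1 = (k + 1) + 1 from rfl,
        PySem.List.pyRange_one_succ_right (by omega : (1:Int) ≤ k + 1),
        List.foldl_append, hfold]
    simp only [List.foldl_cons, List.foldl_nil, pvStep]
    by_cases hlt : pvScoreLt (pvScore n (k+1)) (pvScore n ρ) = true
    · rw [if_pos hlt]
      refine ⟨k+1, rfl, by omega, le_refl _, ?_, ?_⟩
      · intro r h1 h2
        rcases eq_or_lt_of_le h2 with rfl | h2'
        · exact pvScoreLt_irrefl _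
        · exact (pvScoreLt_asym_trans _ _ _ (hmin r h1 (by omega)) hlt).2
      · intro r h1 h2
        exact (pvScoreLt_asym_trans _ _ _ (hmin r h1 (by omega)) hlt).1
    · rw [if_neg hlt]
      refine ⟨ρ, rfl, hρ1, by omega, ?_, hfirst⟩
      intro r h1 h2
      rcases eq_or_lt_of_le h2 with rfl | h2'
      · exact eq_false_of_ne_true hlt
      · exact hmin r h1 (by omega)

theorem pvScoreLt_iff (s t : Int × Int) :
    pvScoreLt s t = true ↔ (s.1 < t.1 ∨ (s.1 = t.1 ∧ s.2 < t.2)) := by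
  simp [pvScoreLt]

theorem pvScoreLt_false_iff (s t : Int × Int) :
    pvScoreLt s t = false ↔ (t.1 < s.1 ∨ (t.1 = s.1 ∧ t.2 ≤ s.2)) := by
  simp only [pvScoreLt, Bool.or_eq_false_iff, Bool.and_eq_false_iff, decide_eq_false_iff_not,
    not_lt, beq_eq_false_iff_ne, ne_eq]
  omega

theorem pv_rho_eq (n : Int) (hn : 1 ≤ n) :
    ∀ ρ, 1 ≤ ρ → ρ ≤ n →
    (∀ r, 1 ≤ r → r ≤ n → pvScoreLt (pvScore n r) (pvScore n ρ) = false) →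
    (∀ r, 1 ≤ r → r < ρ → pvScoreLt (pvScore n ρ) (pvScore n r) = true) →
    ρ = pvBLoop (n.toNat + 1) n 1 1 := by
  intro ρ hρ1 hρn hmin hfirst
  obtain ⟨hR0, hRmax⟩ := pvBLoop_inv n (n.toNat + 1) 1 1 (le_refl 1) (by omega)
  set R := pvBLoop (n.toNat + 1) n 1 1 with hRdef
  have hR1 : 1 ≤ R := by
    rcases hR0 with h | h
    · omega
    · exact h.1
  have hRd : R ∣ n := by
    rcases hR0 with h | h
    · rw [h]; exact one_dvd n
    · exact h.2.1
  have hRsq : R * R ≤ n := by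
    rcases hR0 with h | h
    · rw [h]; omega
    · exact h.2.2
  have hRn : R ≤ n := Int.le_of_dvd (by omega) hRd
  have hRdiv : R ≤ n / R := pv_le_div_of_sq_le n R hR1 hRd hRsq
  have scoreR : pvScore n R = (0, n / R - R) := by
    rw [pvScore_of_dvd n R hR1 hRd, abs_of_nonpos (by omega)]
    congr 1
    omega
  have hminR := hmin R hR1 hRn
  have hρd : ρ ∣ n := by
    by_contra hnd
    have h1 := pvScore_of_not_dvd n ρ hρ1 hnd
    have h2 := (pvScoreLt_false_iff _ _).mp hminR
    rw [scoreR] at h2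
    simp only at h2
    omega
  have hρdiv : ρ * (n / ρ) = n := Int.mul_ediv_cancel' hρd
  have scoreρ : pvScore n ρ = (0, |ρ - n / ρ|) := pvScore_of_dvd n ρ hρ1 hρd
  by_contra hne
  rcases lt_or_gt_of_ne (fun h => hne h) with hlt | hlt
  · -- ρ < R : A's minimum would be strictly better at R
    have hρsq : ρ * ρ ≤ n := by nlinarith
    have hg := pv_g_strict n ρ R hρ1 hlt hρd hRd hRsq
    have hρle : ρ ≤ n / ρ := pv_le_div_of_sq_le n ρ hρ1 hρd hρsq
    have : pvScoreLt (pvScore n R) (pvScore n ρ) = true := by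
      rw [pvScoreLt_iff, scoreR, scoreρ, abs_of_nonpos (by omega)]
      right
      constructor
      · rfl
      · simp only
        omega
    rw [this] at hminR
    exact Bool.true_eq_false.mp hminR
  · -- R < ρ : the strict-first property at R fails
    have hfR := hfirst R hR1 hlt
    by_cases hc : ρ * ρ ≤ n
    · have := hRmax ρ hρ1 hρd hc
      omega
    · push Not at hc
      set s := n / ρ with hsdef
      have hs1 : 1 ≤ s := by nlinarith
      have hsρ : s < ρ := by nlinarith
      have hsd : s ∣ n := ⟨ρ, by linarith [hρdiv, mul_comm ρ s]⟩
      have hss : s * s ≤ n := by nlinarith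
      have hsR : s ≤ R := hRmax s hs1 hsd hss
      have hns : n / s = ρ := by
        have : n = s * ρ := by linarith [mul_comm ρ s]
        rw [this, Int.mul_ediv_cancel_left _ (by omega : s ≠ 0)]
      have hgm : n / R - R ≤ n / s - s := by
        rcases eq_or_lt_of_le hsR with heq | hsR'
        · rw [heq]
        · exact le_of_lt (pv_g_strict n s R hs1 hsR' hsd hRd hRsq)
      have : pvScoreLt (pvScore n ρ) (pvScore n R) = false := by
        rw [pvScoreLt_false_iff, scoreR, scoreρ, abs_of_nonneg (by omega)]
        right
        constructor
        · rfl
        · simp only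
          omega
      rw [this] at hfR
      exact Bool.false_eq_true.mp hfR

-- ===== VERDICT (by name: the statement is the Claim_ definition above) =====
theorem choose_layout_spec : Claim_equal_choose_layout := by
  intro n _ hpre
  unfold Spec_choose_layout choose_layout choose_layout_alt
  rw [if_neg (by decide), if_neg (by decide)]
  obtain ⟨ρ, hfold, hρ1, hρn, hmin, hfirst⟩ := pvALoop_inv n hpre n hpre (le_refl n)
  have hρR : ρ = pvBLoop (n.toNat + 1) n 1 1 := pv_rho_eq n hpre ρ hρ1 hρn hmin hfirst
  rw [hfold]
  simp only
  obtain ⟨hR0, _⟩ := pvBLoop_inv n (n.toNat + 1) 1 1 (le_refl 1) (by omega)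
  have hR1 : 1 ≤ pvBLoop (n.toNat + 1) n 1 1 := by
    rcases hR0 with h | h
    · omega
    · exact h.1
  have hRd : pvBLoop (n.toNat + 1) n 1 1 ∣ n := by
    rcases hR0 with h | h
    · rw [h]; exact one_dvd n
    · exact h.2.1
  rw [hρR, pvC_of_dvd n _ hR1 hRd, PySem.Int.floordiv_eq_ediv_of_pos (by omega)]
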